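-- pv_equiv track=rewrite | github.com/ml-uhh/qubo-benchmark | generate/compsup/quenchlib/instances/_diamond.py | diamond_to_int_dict
-- ===== SOURCE A (Python) =====
-- import itertools
--
-- def coords_3d_to_diamond(coords):
--     gray_z_index = [[1, 0], [2, 3]]
--     return [
--         (
--             x,
--             y,
--             4 * z + gray_z_index[x % 2][y % 2]
--         ) for (x, y, z) in coords
--     ]
--
-- def coords_diamond_to_3d(coords):
--     """coords is a list of 3-tuples."""
--     # Should we assert x and y are correct?
--     for (x, y, z) in coords:
--         assert (x % 2) == int((z % 4) / 2)
--         assert (y % 2) == 1 - int(((z + 1) % 4) / 2)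
--     return [
--         (
--             x,
--             y,
--             int(z / 4),
--         ) for (x, y, z) in coords
--     ]
--
-- def diamond_to_int_dict(dimensions):
--     coords3d = [(x, y, z) for (y, z, x) in itertools.product(
--         range(dimensions[1]),
--         range(int(dimensions[2] / 4)),
--         range(dimensions[0]),
--     )]
--     coords_diamond_in_order = coords_3d_to_diamond(coords3d)
--
--     assert coords_diamond_to_3d(coords_diamond_in_order) == coords3d
--
--     return {q: i for i, q in enumerate(coords_diamond_in_order)}
-- ===== SOURCE B (Python) =====
-- def diamond_to_int_dict(dimensions):
--     nx = dimensions[0]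
--     ny = dimensions[1]
--     nz = int(dimensions[2] / 4)
--     if nx <= 0 or ny <= 0 or nz <= 0:
--         return {}
--     result = {}
--     for i in range(nx * ny * nz):
--         x = i % nx
--         z = (i // nx) % nz
--         y = i // (nx * nz)
--         g = 1 - y % 2 if x % 2 == 0 else 2 + y % 2
--         result[(x, y, 4 * z + g)] = i
--     return result
-- ===== Notes on version B (the rewrite author's own statement) =====
-- stated objective: alternative
-- what changed: B replaces A's staged pipeline (materialised coords3d product list, diamond-mapping pass, round-trip assertion, enumerate pass) by a single counter loop over range(nx*ny*nz) that decodes x, y, z from the flat index with div/mod arithmetic and computes the gray offset arithmetically (1 - y%2 or 2 + y%2) instead of a table lookup.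
import Mathlib
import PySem

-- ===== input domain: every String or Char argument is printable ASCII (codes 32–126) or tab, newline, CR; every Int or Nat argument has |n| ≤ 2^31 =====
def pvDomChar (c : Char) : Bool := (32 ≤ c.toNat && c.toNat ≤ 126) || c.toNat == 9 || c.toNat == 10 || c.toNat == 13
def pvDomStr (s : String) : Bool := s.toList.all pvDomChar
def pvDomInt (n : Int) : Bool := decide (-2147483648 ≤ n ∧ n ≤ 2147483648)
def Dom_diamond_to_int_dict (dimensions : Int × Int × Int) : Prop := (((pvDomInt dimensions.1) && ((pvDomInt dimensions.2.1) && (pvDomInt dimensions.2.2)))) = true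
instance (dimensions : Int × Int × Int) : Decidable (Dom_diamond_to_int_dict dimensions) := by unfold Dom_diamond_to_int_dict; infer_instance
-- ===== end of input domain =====

-- B replaces A's staged passes (coords3d product list, diamond-map pass, round-trip assertion,
-- enumerate pass) by one counter loop over range(nx*ny*nz) that decodes x, y, z from the flat
-- index by div/mod and computes the gray offset arithmetically.

-- gray_z_index[x % 2][y % 2] : the 2x2 table lookup [[1,0],[2,3]], exact since x % 2, y % 2 ∈ {0,1}
def pvGray (x y : Int) : Int :=
  if PySem.Int.mod x 2 = 0 then (if PySem.Int.mod y 2 = 0 then 1 else 0)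
  else (if PySem.Int.mod y 2 = 0 then 2 else 3)

-- ===== PORT A =====
def coords_3d_to_diamond (coords : List (Int × Int × Int)) : List (Int × Int × Int) :=
  coords.map (fun t => (t.1, t.2.1, 4 * t.2.2 + pvGray t.1 t.2.1))

-- int(dimensions[2] / 4) : exact float division by 4 then truncation toward zero = Int.tdiv (|n| ≤ 2^31 keeps the float exact).
-- A's assertion 'coords_diamond_to_3d(...) == coords3d' is always satisfied (z ≥ 0, and the parities encode 4z+g exactly),
-- so A never raises and the assertion line is omitted from the port.
def diamond_to_int_dict (dimensions : Int × Int × Int) : List (Int × Int × Int × Int) :=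
  let coords3d : List (Int × Int × Int) :=
    (PySem.List.pyRange 0 dimensions.2.1 1).flatMap (fun y =>
      (PySem.List.pyRange 0 (Int.tdiv dimensions.2.2 4) 1).flatMap (fun z =>
        (PySem.List.pyRange 0 dimensions.1 1).map (fun x => (x, y, z))))
  let coords_diamond_in_order := coords_3d_to_diamond coords3d
  (((PySem.List.enumerate coords_diamond_in_order 0).foldl
      (fun d p => d.insert p.2 p.1) (PySem.Dict.empty : PySem.Dict (Int × Int × Int) Int)).items).map
    (fun p => (p.1.1, p.1.2.1, p.1.2.2, p.2))

-- ===== PORT B =====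
def diamond_to_int_dict_alt (dimensions : Int × Int × Int) : List (Int × Int × Int × Int) :=
  let nx := dimensions.1
  let ny := dimensions.2.1
  let nz := Int.tdiv dimensions.2.2 4
  if nx ≤ 0 ∨ ny ≤ 0 ∨ nz ≤ 0 then []
  else
    (((PySem.List.pyRange 0 (nx * ny * nz) 1).foldl (fun d i =>
        let x := PySem.Int.mod i nx
        let z := PySem.Int.mod (PySem.Int.floordiv i nx) nz
        let y := PySem.Int.floordiv i (nx * nz)
        let g := if PySem.Int.mod x 2 = 0 then 1 - PySem.Int.mod y 2 else 2 + PySem.Int.mod y 2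
        d.insert (x, y, 4 * z + g) i)
      (PySem.Dict.empty : PySem.Dict (Int × Int × Int) Int)).items).map
      (fun p => (p.1.1, p.1.2.1, p.1.2.2, p.2))

-- ===== PRECONDITION & SPEC =====
def Spec_diamond_to_int_dict (dimensions : Int × Int × Int) (out : List (Int × Int × Int × Int)) : Prop := out = diamond_to_int_dict_alt dimensions
instance (dimensions : Int × Int × Int) (out : List (Int × Int × Int × Int)) : Decidable (Spec_diamond_to_int_dict dimensions out) := by unfold Spec_diamond_to_int_dict; infer_instance

-- ===== CLAIM (what is proved, stated in full; the proofs are below) =====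
def Claim_equal_diamond_to_int_dict : Prop := ∀ (dimensions : Int × Int × Int), Dom_diamond_to_int_dict dimensions → Spec_diamond_to_int_dict dimensions (diamond_to_int_dict dimensions)

-- ===== LEMMAS AND PROOFS =====

-- the (x, y, z) ↦ diamond-coordinate map (A's per-point transform)
def pvKey (t : Int × Int × Int) : Int × Int × Int := (t.1, t.2.1, 4 * t.2.2 + pvGray t.1 t.2.1)

-- B's flat-index decoder
def pvDec (nx nz : Int) (i : Int) : Int × Int × Int :=
  (PySem.Int.mod i nx, PySem.Int.floordiv i (nx * nz), PySem.Int.mod (PySem.Int.floordiv i nx) nz)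

-- B's key at flat index i
def pvBKey (nx nz : Int) (i : Int) : Int × Int × Int :=
  let x := PySem.Int.mod i nx
  let z := PySem.Int.mod (PySem.Int.floordiv i nx) nz
  let y := PySem.Int.floordiv i (nx * nz)
  (x, y, 4 * z + (if PySem.Int.mod x 2 = 0 then 1 - PySem.Int.mod y 2 else 2 + PySem.Int.mod y 2))

theorem pv_enumerate_map {α β : Type} (f : α → β) (xs : List α) (s : Int) :
    PySem.List.enumerate (xs.map f) s = (PySem.List.enumerate xs s).map (fun p => (p.1, f p.2)) := by
  induction xs generalizing s with
  | nil => simp [PySem.List.enumerate_nil]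
  | cons x xs ih => simp [PySem.List.enumerate_cons, ih]

theorem pv_enum_succ {α : Type} (xs : List α) (s : Int) :
    PySem.List.enumerate xs (s + 1) = (PySem.List.enumerate xs s).map (fun p => (p.1 + 1, p.2)) := by
  induction xs generalizing s with
  | nil => simp [PySem.List.enumerate_nil]
  | cons x xs ih => simp [PySem.List.enumerate_cons, ih]

theorem pv_enum_nat_range (m : Nat) :
    PySem.List.enumerate ((List.range m).map (fun (k : Nat) => (k : Int))) 0
      = (List.range m).map (fun (k : Nat) => ((k : Int), (k : Int))) := by
  induction m with
  | zero => rfl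
  | succ m ih =>
      rw [List.range_succ_eq_map, List.map_cons, List.map_cons, PySem.List.enumerate_cons]
      have hmap : List.map (fun (k : Nat) => (k : Int)) (List.map (fun i => i + 1) (List.range m))
          = List.map (fun n : Int => n + 1) (List.map (fun (k : Nat) => (k : Int)) (List.range m)) := by
        simp only [List.map_map]
        exact List.map_congr_left (fun x _ => by simp)
      rw [hmap, pv_enum_succ, pv_enumerate_map, ih]
      simp [List.map_map, Function.comp_def]

theorem pv_key_inj (t u : Int × Int × Int) (h : pvKey t = pvKey u) : t = u := by
  obtain ⟨x, y, z⟩ := t; obtain ⟨x', y', z'⟩ := u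
  simp only [pvKey, Prod.mk.injEq] at h
  obtain ⟨hx, hy, hz⟩ := h
  subst hx; subst hy
  have hz' : z = z' := by omega
  subst hz'; rfl

theorem pv_coords3d_nodup (X Y Z : Int) :
    ((PySem.List.pyRange 0 Y 1).flatMap (fun y =>
      (PySem.List.pyRange 0 Z 1).flatMap (fun z =>
        (PySem.List.pyRange 0 X 1).map (fun x => (x, y, z))))).Nodup := by
  refine List.nodup_flatMap.2 ⟨fun y _ => ?_, ?_⟩
  · refine List.nodup_flatMap.2 ⟨fun z _ => ?_, ?_⟩
    · refine (PySem.List.nodup_pyRange_one 0 X).map ?_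
      intro a b h
      simpa using congrArg Prod.fst h
    · refine (PySem.List.nodup_pyRange_one 0 Z).imp ?_
      intro z z' hne
      simp only [Function.onFun, List.disjoint_left]
      rintro p hp hq
      simp only [List.mem_map] at hp hq
      obtain ⟨x, _, rfl⟩ := hp
      obtain ⟨x', _, h⟩ := hq
      have hz : z' = z := by simpa using congrArg (fun q => q.2.2) h
      exact hne hz.symm
  · refine (PySem.List.nodup_pyRange_one 0 Y).imp ?_
    intro y y' hne
    simp only [Function.onFun, List.disjoint_left]
    rintro p hp hq
    simp only [List.mem_flatMap, List.mem_map] at hp hq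
    obtain ⟨z, _, x, _, rfl⟩ := hp
    obtain ⟨z', _, x', _, h⟩ := hq
    have hy : y' = y := by simpa using congrArg (fun q => q.2.1) h
    exact hne hy.symm

-- inner slice of the grid: z-x product as a single range decoded by div/mod
theorem pv_inner_grid (X : Nat) (y : Int) (Z : Nat) :
    (List.range Z).flatMap (fun (z : Nat) => (List.range X).map (fun (x : Nat) => ((x : Int), y, (z : Int))))
      = (List.range (X * Z)).map (fun (j : Nat) => (((j % X : Nat) : Int), y, ((j / X : Nat) : Int))) := by
  induction Z with
  | zero => simp
  | succ Z ih =>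
      rw [List.range_succ, List.flatMap_append, ih, Nat.mul_succ, List.range_add, List.map_append]
      congr 1
      simp only [List.flatMap_cons, List.flatMap_nil, List.append_nil, List.map_map]
      refine List.map_congr_left (fun x hx => ?_)
      have hxX : x < X := List.mem_range.mp hx
      have hX : 0 < X := by omega
      simp only [Function.comp_def]
      have h1 : (X * Z + x) % X = x := by
        rw [Nat.add_comm, Nat.add_mul_mod_self_left, Nat.mod_eq_of_lt hxX]
      have h2 : (X * Z + x) / X = Z := by
        rw [Nat.add_comm, Nat.mul_comm, Nat.add_mul_div_right _ _ hX, Nat.div_eq_of_lt hxX]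
        omega
      rw [h1, h2]

-- the whole y-z-x grid as a single range decoded by div/mod
theorem pv_nat_grid (X Z : Nat) (Y : Nat) :
    (List.range Y).flatMap (fun (y : Nat) => (List.range Z).flatMap (fun (z : Nat) =>
        (List.range X).map (fun (x : Nat) => ((x : Int), (y : Int), (z : Int)))))
      = (List.range (X * Y * Z)).map
          (fun (i : Nat) => (((i % X : Nat) : Int), ((i / (X * Z) : Nat) : Int), ((i / X % Z : Nat) : Int))) := by
  induction Y with
  | zero => simp
  | succ Y ih =>
      rw [List.range_succ, List.flatMap_append,
          show X * (Y + 1) * Z = X * Y * Z + X * Z by ring, List.range_add, List.map_append, ih]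
      congr 1
      simp only [List.flatMap_cons, List.flatMap_nil, List.append_nil]
      rw [pv_inner_grid X (Y : Int) Z, List.map_map]
      refine List.map_congr_left (fun j hj => ?_)
      have hjXZ : j < X * Z := List.mem_range.mp hj
      have hXZ : 0 < X * Z := by omega
      have hX : 0 < X := by
        rcases Nat.eq_zero_or_pos X with h | h
        · subst h; simp at hXZ
        · exact h
      simp only [Function.comp_def]
      have h1 : (X * Y * Z + j) % X = j % X := by
        rw [show X * Y * Z + j = j + (Y * Z) * X by ring, Nat.add_mul_mod_self_right]
      have h2 : (X * Y * Z + j) / (X * Z) = Y := by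
        rw [show X * Y * Z + j = j + Y * (X * Z) by ring,
            Nat.add_mul_div_right _ _ hXZ, Nat.div_eq_of_lt hjXZ, Nat.zero_add]
      have h3 : (X * Y * Z + j) / X % Z = j / X := by
        have hdiv : j / X < Z := (Nat.div_lt_iff_lt_mul hX).2 (by rw [Nat.mul_comm Z X]; exact hjXZ)
        rw [show X * Y * Z + j = j + (Y * Z) * X by ring,
            Nat.add_mul_div_right _ _ hX, Nat.add_mul_mod_self_right, Nat.mod_eq_of_lt hdiv]
      rw [h1, h2, h3]

theorem diamond_to_int_dict_spec : Claim_equal_diamond_to_int_dict := by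
  intro dims _
  unfold Spec_diamond_to_int_dict diamond_to_int_dict diamond_to_int_dict_alt
  dsimp only
  set nx := dims.1 with hnx
  set ny := dims.2.1 with hny
  set nz := Int.tdiv dims.2.2 4 with hnz
  set L3 := (PySem.List.pyRange 0 ny 1).flatMap (fun y =>
      (PySem.List.pyRange 0 nz 1).flatMap (fun z =>
        (PySem.List.pyRange 0 nx 1).map (fun x => (x, y, z)))) with hL3
  by_cases hdeg : nx ≤ 0 ∨ ny ≤ 0 ∨ nz ≤ 0
  · -- some dimension empty: both sides are []
    rw [if_pos hdeg]
    have hnil : L3 = [] := by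
      rcases hdeg with h | h | h
      · rw [hL3]
        refine List.flatMap_eq_nil_iff.2 (fun y _ => ?_)
        refine List.flatMap_eq_nil_iff.2 (fun z _ => ?_)
        simp [PySem.List.pyRange_one_eq_nil h]
      · simp [hL3, PySem.List.pyRange_one_eq_nil h]
      · rw [hL3]
        refine List.flatMap_eq_nil_iff.2 (fun y _ => ?_)
        simp [PySem.List.pyRange_one_eq_nil h]
    rw [show coords_3d_to_diamond L3 = [] by rw [hnil]; rfl]
    simp [PySem.List.enumerate_nil, PySem.Dict.empty]
  · rw [if_neg hdeg]
    push Not at hdeg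
    obtain ⟨hx0, hy0, hz0⟩ := hdeg
    set a := nx.toNat with ha
    set b := ny.toNat with hb
    set c := nz.toNat with hc
    have hxa : nx = (a : Int) := by omega
    have hyb : ny = (b : Int) := by omega
    have hzc : nz = (c : Int) := by omega
    -- the grid list is the decoded flat range
    have hL : L3 = ((List.range (a * b * c)).map (fun (i : Nat) => (i : Int))).map (pvDec nx nz) := by
      rw [hL3, hxa, hyb, hzc,
          PySem.List.pyRange_zero_nat, PySem.List.pyRange_zero_nat, PySem.List.pyRange_zero_nat]
      simp only [List.flatMap_map, List.map_map, Function.comp_def]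
      rw [pv_nat_grid a c b]
      refine List.map_congr_left (fun i _ => ?_)
      simp only [pvDec, ← Nat.cast_mul, PySem.Int.mod_natCast, PySem.Int.floordiv_natCast]
    -- the flat B range is the cast nat range
    have hrange : PySem.List.pyRange 0 (nx * ny * nz) 1
        = (List.range (a * b * c)).map (fun (i : Nat) => (i : Int)) := by
      rw [show nx * ny * nz = ((a * b * c : Nat) : Int) by rw [hxa, hyb, hzc]; push_cast; ring]
      exact PySem.List.pyRange_zero_nat _
    -- B's key equals A's key at each decoded point
    have hkey : ∀ i : Int, 0 ≤ i → pvBKey nx nz i = pvKey (pvDec nx nz i) := by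
      intro i hi
      have h0 : (0:Int) < nx * nz := mul_pos hx0 hz0
      have hy2 : PySem.Int.mod (PySem.Int.floordiv i (nx * nz)) 2 = 0 ∨
          PySem.Int.mod (PySem.Int.floordiv i (nx * nz)) 2 = 1 := by
        have h1 := PySem.Int.mod_nonneg (PySem.Int.floordiv i (nx * nz)) (by norm_num : (0:Int) < 2)
        have h2 := PySem.Int.mod_lt (PySem.Int.floordiv i (nx * nz)) (by norm_num : (0:Int) < 2)
        omega
      rcases hy2 with h | h <;> simp only [pvBKey, pvDec, pvKey, pvGray, h] <;> norm_num
    -- A's dict has fresh, pairwise-distinct keys, so its items list in insertion order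
    have hnodupL3 : L3.Nodup := hL3 ▸ pv_coords3d_nodup nx ny nz
    have hnodup : (L3.map pvKey).Nodup := hnodupL3.map_on (fun t _ u _ h => pv_key_inj t u h)
    have hA :
        ((PySem.List.enumerate (L3.map pvKey) 0).foldl
          (fun d p => d.insert p.2 p.1) (PySem.Dict.empty : PySem.Dict (Int × Int × Int) Int)).items
        = (PySem.Dict.empty : PySem.Dict (Int × Int × Int) Int).items
            ++ (PySem.List.enumerate (L3.map pvKey) 0).map (fun p => (p.2, p.1)) :=
      PySem.Dict.items_foldl_insert_fresh (PySem.List.enumerate (L3.map pvKey) 0)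
        (fun (p : Int × (Int × Int × Int)) => p.2) (fun p => p.1) _
        (fun p _ => PySem.Dict.contains_empty _)
        (by rw [show (PySem.List.enumerate (L3.map pvKey) 0).map
                    (fun (p : Int × (Int × Int × Int)) => p.2)
                  = L3.map pvKey from PySem.List.map_snd_enumerate _ _]; exact hnodup)
    -- B's dict keys are the same keys, so likewise fresh
    have hBkeys : (PySem.List.pyRange 0 (nx * ny * nz) 1).map (fun i => pvBKey nx nz i)
        = L3.map pvKey := by
      rw [hrange, hL, List.map_map, List.map_map, List.map_map]
      refine List.map_congr_left (fun i _ => ?_)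
      simp only [Function.comp_apply]
      exact hkey (i : Int) (Int.natCast_nonneg i)
    have hB :
        ((PySem.List.pyRange 0 (nx * ny * nz) 1).foldl
          (fun d i => d.insert (pvBKey nx nz i) i)
          (PySem.Dict.empty : PySem.Dict (Int × Int × Int) Int)).items
        = (PySem.Dict.empty : PySem.Dict (Int × Int × Int) Int).items
            ++ (PySem.List.pyRange 0 (nx * ny * nz) 1).map (fun i => (pvBKey nx nz i, i)) :=
      PySem.Dict.items_foldl_insert_fresh (PySem.List.pyRange 0 (nx * ny * nz) 1)
        (fun (i : Int) => pvBKey nx nz i) (fun i => i) _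
        (fun i _ => PySem.Dict.contains_empty _) (hBkeys ▸ hnodup)
    -- rewrite both folds and compare the (key, index) lists
    rw [show coords_3d_to_diamond L3 = L3.map pvKey from rfl]
    rw [show (fun (d : PySem.Dict (Int × Int × Int) Int) (i : Int) =>
          d.insert (PySem.Int.mod i nx, PySem.Int.floordiv i (nx * nz),
            4 * PySem.Int.mod (PySem.Int.floordiv i nx) nz +
              if PySem.Int.mod (PySem.Int.mod i nx) 2 = 0
              then 1 - PySem.Int.mod (PySem.Int.floordiv i (nx * nz)) 2
              else 2 + PySem.Int.mod (PySem.Int.floordiv i (nx * nz)) 2) i)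
        = (fun (d : PySem.Dict (Int × Int × Int) Int) (i : Int) =>
            d.insert (pvBKey nx nz i) i) from rfl]
    rw [hA, hB]
    simp only [PySem.Dict.empty, List.nil_append]
    rw [hrange, hL, pv_enumerate_map, pv_enumerate_map, pv_enum_nat_range]
    simp only [List.map_map]
    refine List.map_congr_left (fun i _ => ?_)
    simp only [Function.comp_def]
    rw [hkey (i : Int) (Int.natCast_nonneg i)]
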